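-- pv_equiv track=rewrite | github.com/JonKragskow/Waveplot | pages/core/utils.py | remove_label_indices
-- ===== SOURCE A (Python) =====
-- def remove_label_indices(labels):
--     """
--     Remove label indexing from atomic symbols
--     indexing is either numbers or numbers followed by letters:
--     e.g. H1, H2, H3
--     or H1a, H2a, H3a
--
--     Parameters
--     ----------
--     labels : list
--         atomic labels
--
--     Returns
--     -------
--     list
--         atomic labels without indexing
--     """
--
--     labels_nn = []
--     for label in labels:
--         no_digits = []
--         for i in label:
--             if not i.isdigit():
--                 no_digits.append(i)
--             elif i.isdigit():
--                 break
--         result = ''.join(no_digits)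
--         labels_nn.append(result)
--
--     return labels_nn
-- ===== SOURCE B (Python) =====
-- def _stem(label):
--     # cut = position of the earliest digit occurrence, found by one
--     # substring search per digit character; len(label) if none occurs
--     cut = len(label)
--     for digit in "0123456789":
--         pos = label.find(digit)
--         if pos != -1 and pos < cut:
--             cut = pos
--     return label[:cut]
--
--
-- def remove_label_indices(labels):
--     return [_stem(label) for label in labels]
-- ===== Notes on version B (the rewrite author's own statement) =====
-- stated objective: alternative
-- what changed: B locates the earliest digit by running one str.find per digit character '0'-'9' and taking the minimum position, then returns a single bulk slice label[:cut], instead of A's character-by-character scan that accumulates non-digit characters into a list, breaks at the first digit and joins.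
import Mathlib
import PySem

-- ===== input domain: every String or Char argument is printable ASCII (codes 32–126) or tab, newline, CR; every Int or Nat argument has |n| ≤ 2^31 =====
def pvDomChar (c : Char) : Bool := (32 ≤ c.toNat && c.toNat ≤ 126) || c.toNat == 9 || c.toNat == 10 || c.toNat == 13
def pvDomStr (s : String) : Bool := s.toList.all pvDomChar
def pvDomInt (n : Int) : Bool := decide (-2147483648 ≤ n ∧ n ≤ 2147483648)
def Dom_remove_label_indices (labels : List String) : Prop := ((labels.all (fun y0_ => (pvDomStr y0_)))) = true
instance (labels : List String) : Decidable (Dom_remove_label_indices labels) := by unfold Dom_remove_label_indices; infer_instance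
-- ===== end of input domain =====

-- B finds the earliest digit via one substring search per digit character '0'-'9' plus a bulk slice, replacing A's per-character accumulate-and-break scan (alternative algorithm, same cost).


-- ===== PORT A =====
-- inner loop of A: append each non-digit char, break at the first digit
def pvStripDigitsA : List Char → List Char
  | [] => []
  | c :: cs => if ¬ PySem.Chars.isdigit c then c :: pvStripDigitsA cs else []

def remove_label_indices (labels : List String) : List String :=
  labels.foldl (fun labels_nn label =>
    labels_nn ++ [String.ofList (pvStripDigitsA label.toList)]) []

-- ===== PORT B =====
-- helper _stem of Source B: minimum over the ten digit characters of label.find(digit), then one slice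
def pvStem (label : String) : String :=
  let cut : Int := ("0123456789".toList).foldl (fun cut digit =>
    let pos := PySem.Str.find label (String.ofList [digit])
    if pos ≠ -1 ∧ pos < cut then pos else cut) (PySem.Str.len label)
  PySem.Str.slice label none (some cut)

def remove_label_indices_alt (labels : List String) : List String :=
  labels.map pvStem

-- ===== PRECONDITION & SPEC =====
def Spec_remove_label_indices (labels : List String) (out : List String) : Prop := out = remove_label_indices_alt labels
instance (labels : List String) (out : List String) : Decidable (Spec_remove_label_indices labels out) := by unfold Spec_remove_label_indices; infer_instance

-- ===== CLAIM (what is proved, stated in full; the proofs are below) =====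
def Claim_equal_remove_label_indices : Prop := ∀ (labels : List String), Dom_remove_label_indices labels → Spec_remove_label_indices labels (remove_label_indices labels)

-- ===== LEMMAS AND PROOFS =====

-- index of the first digit character (length of the string if none)
def pvFdi : List Char → Nat
  | [] => 0
  | c :: cs => if PySem.Chars.isdigit c then 0 else pvFdi cs + 1

theorem pvStrip_eq_take (cs : List Char) :
    pvStripDigitsA cs = cs.take (pvFdi cs) := by
  induction cs with
  | nil => rfl
  | cons c cs ih =>
    by_cases h : PySem.Chars.isdigit c <;>
      simp [pvStripDigitsA, pvFdi, h, ih]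

theorem pvFdi_le (cs : List Char) : pvFdi cs ≤ cs.length := by
  induction cs with
  | nil => simp [pvFdi]
  | cons c cs ih =>
    cases h : PySem.Chars.isdigit c <;> simp [pvFdi, h] <;> omega

theorem pvFdi_before (cs : List Char) (i : Nat) (h : i < pvFdi cs) :
    ∃ c, cs[i]? = some c ∧ PySem.Chars.isdigit c = false := by
  induction cs generalizing i with
  | nil => simp [pvFdi] at h
  | cons c cs ih =>
    cases hd : PySem.Chars.isdigit c
    · cases i with
      | zero => exact ⟨c, by simp, hd⟩
      | succ i =>
        simp only [pvFdi, hd, if_neg Bool.false_ne_true] at h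
        obtain ⟨c', hc', hdc'⟩ := ih i (by omega)
        exact ⟨c', by simpa using hc', hdc'⟩
    · simp [pvFdi, hd] at h

theorem pvFdi_at (cs : List Char) (h : pvFdi cs < cs.length) :
    ∃ c, cs[pvFdi cs]? = some c ∧ PySem.Chars.isdigit c = true := by
  induction cs with
  | nil => simp at h
  | cons c cs ih =>
    cases hd : PySem.Chars.isdigit c
    · simp only [pvFdi, hd, if_neg Bool.false_ne_true, List.length_cons] at h ⊢
      obtain ⟨c', hc', hdc'⟩ := ih (by omega)
      exact ⟨c', by simpa using hc', hdc'⟩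
    · exact ⟨c, by simp [pvFdi, hd], hd⟩

theorem pvPrefix_singleton_iff (d : Char) (l : List Char) :
    [d] <+: l ↔ l.head? = some d := by
  cases l with
  | nil => simp
  | cons a t => simp [List.cons_prefix_cons, eq_comm]

-- find for a one-character pattern: the found position carries that character
theorem pvFind_get (cs : List Char) (d : Char)
    (h : 0 ≤ PySem.Chars.find cs [d]) :
    cs[(PySem.Chars.find cs [d]).toNat]? = some d ∧
      ∀ i < (PySem.Chars.find cs [d]).toNat, cs[i]? ≠ some d := by
  obtain ⟨h1, h2⟩ := PySem.Chars.find_spec h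
  rw [pvPrefix_singleton_iff, List.head?_drop] at h1
  refine ⟨h1, fun i hi hci => ?_⟩
  exact h2 i hi ((pvPrefix_singleton_iff d _).mpr (by rwa [List.head?_drop]))

theorem pvMem_digits (d : Char) (h : PySem.Chars.isdigit d = true) :
    d ∈ ("0123456789".toList) := by
  simp only [PySem.Chars.isdigit, Bool.and_eq_true, decide_eq_true_eq] at h
  obtain ⟨h1, h2⟩ := h
  have hl : 48 ≤ d.toNat := h1
  have hr : d.toNat ≤ 57 := h2
  have hofNat : Char.ofNat d.toNat = d := Char.ofNat_toNat d
  interval_cases hdt : d.toNat <;>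
    · rw [← hofNat]; decide

-- any position found for a digit character is ≥ the first-digit index
theorem pvFdi_le_find (cs : List Char) (d : Char)
    (hd : PySem.Chars.isdigit d = true)
    (h : 0 ≤ PySem.Chars.find cs [d]) :
    (pvFdi cs : Int) ≤ PySem.Chars.find cs [d] := by
  obtain ⟨h1, _⟩ := pvFind_get cs d h
  by_contra hlt
  push_neg at hlt
  have hlt' : (PySem.Chars.find cs [d]).toNat < pvFdi cs := by omega
  obtain ⟨c, hc, hdc⟩ := pvFdi_before cs _ hlt'
  rw [h1] at hc
  cases hc
  rw [hd] at hdc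
  exact absurd hdc (by simp)

-- the fold step of B, named for the lemmas
def pvStep (cs : List Char) (cut : Int) (d : Char) : Int :=
  if PySem.Chars.find cs [d] ≠ -1 ∧ PySem.Chars.find cs [d] < cut then PySem.Chars.find cs [d] else cut

theorem pvFoldl_le (cs : List Char) (D : List Char) (m : Int) :
    D.foldl (pvStep cs) m ≤ m := by
  induction D generalizing m with
  | nil => simp
  | cons d D ih =>
    refine le_trans (ih _) ?_
    unfold pvStep
    split_ifs with h
    · exact le_of_lt h.2
    · exact le_refl m

theorem pvFoldl_ge (cs : List Char) (D : List Char) (m : Int)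
    (hD : ∀ d ∈ D, PySem.Chars.isdigit d = true)
    (hm : (pvFdi cs : Int) ≤ m) :
    (pvFdi cs : Int) ≤ D.foldl (pvStep cs) m := by
  induction D generalizing m with
  | nil => simpa
  | cons d D ih =>
    refine ih _ (fun x hx => hD x (List.mem_cons_of_mem _ hx)) ?_
    unfold pvStep
    split_ifs with h
    · have hpos : 0 ≤ PySem.Chars.find cs [d] := by
        have := PySem.Chars.neg_one_le_find cs [d]
        omega
      exact pvFdi_le_find cs d (hD d (List.mem_cons_self)) hpos
    · exact hm

-- when a digit occurs, find at the digit standing at pvFdi returns exactly pvFdi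
theorem pvFind_at_fdi (cs : List Char) (d : Char)
    (hd : PySem.Chars.isdigit d = true)
    (hc : cs[pvFdi cs]? = some d) :
    PySem.Chars.find cs [d] = (pvFdi cs : Int) := by
  have hocc : [d] <+: cs.drop (pvFdi cs) := by
    rw [pvPrefix_singleton_iff, List.head?_drop]; exact hc
  have hinf : [d] <:+: cs :=
    hocc.isInfix.trans (List.drop_suffix _ _).isInfix
  have hpos : 0 ≤ PySem.Chars.find cs [d] :=
    (PySem.Chars.find_nonneg_iff cs [d]).mpr hinf
  obtain ⟨h1, h2⟩ := pvFind_get cs d hpos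
  have hge : (pvFdi cs : Int) ≤ PySem.Chars.find cs [d] := pvFdi_le_find cs d hd hpos
  have hle : (PySem.Chars.find cs [d]).toNat ≤ pvFdi cs := by
    by_contra hlt
    push_neg at hlt
    exact h2 (pvFdi cs) hlt hc
  omega

-- the whole fold computes the first-digit index
theorem pvFold_eq_fdi (cs : List Char) :
    ("0123456789".toList).foldl (pvStep cs) (cs.length : Int) = (pvFdi cs : Int) := by
  have hD : ∀ d ∈ ("0123456789".toList), PySem.Chars.isdigit d = true := by
    intro d hd
    rw [show "0123456789".toList = ['0','1','2','3','4','5','6','7','8','9'] from rfl] at hd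
    fin_cases hd <;> rfl
  have hge := pvFoldl_ge cs _ (cs.length : Int) hD (by exact_mod_cast pvFdi_le cs)
  rcases lt_or_ge (pvFdi cs) cs.length with hlt | hge'
  · obtain ⟨d, hc, hd⟩ := pvFdi_at cs hlt
    obtain ⟨D1, D2, hsplit⟩ := List.append_of_mem (pvMem_digits d hd)
    have hfind := pvFind_at_fdi cs d hd hc
    have hstep : pvStep cs (D1.foldl (pvStep cs) (cs.length : Int)) d ≤ (pvFdi cs : Int) := by
      unfold pvStep
      rw [hfind]
      split_ifs with h
      · exact le_refl _
      · omega
    have hle : ("0123456789".toList).foldl (pvStep cs) (cs.length : Int) ≤ (pvFdi cs : Int) := by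
      rw [hsplit, List.foldl_append, List.foldl_cons]
      exact le_trans (pvFoldl_le cs D2 _) hstep
    omega
  · have hle := pvFoldl_le cs ("0123456789".toList) (cs.length : Int)
    have heq : pvFdi cs = cs.length := le_antisymm (pvFdi_le cs) hge'
    omega

theorem pvStem_eq (label : String) :
    pvStem label = String.ofList (pvStripDigitsA label.toList) := by
  unfold pvStem
  apply String.toList_inj.mp
  simp only [PySem.Str.toList_slice, PySem.Chars.slice_eq_listSlice, String.toList_ofList]
  have hfun : (fun (cut : Int) (digit : Char) =>
      let pos := PySem.Str.find label (String.ofList [digit])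
      if pos ≠ -1 ∧ pos < cut then pos else cut) = pvStep label.toList := by
    funext m d
    simp [pvStep, PySem.Str.find_eq]
  rw [hfun, PySem.Str.len_eq, pvFold_eq_fdi label.toList,
    PySem.List.slice_to _ (by positivity), Int.toNat_natCast, pvStrip_eq_take]

-- ===== VERDICT (by name: the statement is the Claim_ definition above) =====
theorem remove_label_indices_spec : Claim_equal_remove_label_indices := by
  intro labels _
  show _ = _
  unfold remove_label_indices remove_label_indices_alt
  rw [PySem.List.foldl_append_singleton_eq_map]
  simp [pvStem_eq]
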